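-- pv_equiv track=rewrite | github.com/MateuszJanda/mtpc | mtpc.py | _merge_key_bytes_per_pos
-- ===== SOURCE A (Python) =====
-- def _merge_key_bytes_per_pos(key_combinations):
--     possible_keys = []
--     for comb in key_combinations:
--         for pos, keys in enumerate(comb):
--             if pos >= len(possible_keys):
--                 possible_keys.append(set())
--             possible_keys[pos].update(keys)
--
--     return possible_keys
-- ===== SOURCE B (Python) =====
-- def _merge_key_bytes_per_pos(key_combinations):
--     width = max((len(comb) for comb in key_combinations), default=0)
--     return [
--         {key for comb in key_combinations for key in (comb[pos] if pos < len(comb) else ())}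
--         for pos in range(width)
--     ]
-- ===== Notes on version B (the rewrite author's own statement) =====
-- stated objective: idiomatic
-- what changed: B transposes the input: instead of A's outer loop over combinations that grows and mutates a list of sets in place, B computes the result width once and builds each position's set independently as a comprehension over one position-column, with no bounds check or in-place update.
import Mathlib
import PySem

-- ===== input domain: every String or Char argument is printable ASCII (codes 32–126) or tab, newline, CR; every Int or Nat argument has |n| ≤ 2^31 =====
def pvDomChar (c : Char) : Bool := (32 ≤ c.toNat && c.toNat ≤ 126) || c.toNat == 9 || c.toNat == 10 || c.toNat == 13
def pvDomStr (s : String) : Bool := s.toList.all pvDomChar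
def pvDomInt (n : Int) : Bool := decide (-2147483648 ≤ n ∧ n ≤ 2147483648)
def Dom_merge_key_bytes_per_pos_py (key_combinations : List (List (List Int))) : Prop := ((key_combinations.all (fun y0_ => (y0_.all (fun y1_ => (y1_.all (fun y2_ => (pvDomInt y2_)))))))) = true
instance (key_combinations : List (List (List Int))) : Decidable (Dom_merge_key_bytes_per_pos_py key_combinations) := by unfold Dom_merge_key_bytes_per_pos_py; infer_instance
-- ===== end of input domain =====

-- B builds each position's key set independently from a transposed view (one pass per
-- position-column) instead of A's growing list of sets mutated in place; objective: idiomatic.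

-- ===== PORT A =====
-- for comb in key_combinations: for pos, keys in enumerate(comb):
--   if pos >= len(possible_keys): possible_keys.append(set())
--   possible_keys[pos].update(keys)
def merge_key_bytes_per_pos_py (key_combinations : List (List (List Int))) : List (List Int) :=
  key_combinations.foldl
    (fun possible_keys comb =>
      (PySem.List.enumerate comb 0).foldl
        (fun possible_keys pk =>
          let possible_keys :=
            if pk.1 ≥ (possible_keys.length : Int) then possible_keys ++ [([] : List Int)]
            else possible_keys
          -- pk.1 ≥ 0 always (enumerate from 0), so .toNat is exact here
          possible_keys.modify pk.1.toNat (fun s => PySem.Set.update s pk.2))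
        possible_keys)
    []

-- ===== PORT B =====
-- width = max((len(comb) for comb in key_combinations), default=0)
-- [{key for comb in key_combinations for key in (comb[pos] if pos < len(comb) else ())} for pos in range(width)]
def merge_key_bytes_per_pos_py_alt (key_combinations : List (List (List Int))) : List (List Int) :=
  let width := key_combinations.foldl (fun m comb => max m comb.length) 0
  (List.range width).map (fun pos =>
    key_combinations.foldl
      (fun s comb =>
        PySem.Set.update s (if pos < comb.length then comb.getD pos [] else []))
      PySem.Set.empty)

-- ===== PRECONDITION & SPEC =====
def Spec_merge_key_bytes_per_pos_py (key_combinations : List (List (List Int))) (out : List (List Int)) : Prop := out = merge_key_bytes_per_pos_py_alt key_combinations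
instance (key_combinations : List (List (List Int))) (out : List (List Int)) : Decidable (Spec_merge_key_bytes_per_pos_py key_combinations out) := by unfold Spec_merge_key_bytes_per_pos_py; infer_instance

-- ===== CLAIM (what is proved, stated in full; the proofs are below) =====
def Claim_equal_merge_key_bytes_per_pos_py : Prop := ∀ (key_combinations : List (List (List Int))), Dom_merge_key_bytes_per_pos_py key_combinations → Spec_merge_key_bytes_per_pos_py key_combinations (merge_key_bytes_per_pos_py key_combinations)

-- ===== LEMMAS AND PROOFS =====

-- longest-zip merge: one step of A's outer loop, stated structurally
def mergeZip : List (List Int) → List (List Int) → List (List Int)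
  | a, [] => a
  | [], k :: ks => PySem.Set.update PySem.Set.empty k :: mergeZip [] ks
  | s :: a, k :: ks => PySem.Set.update s k :: mergeZip a ks

theorem modify_append_cons (pre suf : List (List Int)) (s : List Int) (f : List Int → List Int) :
    (pre ++ s :: suf).modify pre.length f = pre ++ f s :: suf := by
  induction pre with
  | nil => simp
  | cons x xs ih =>
    show ((x :: (xs ++ s :: suf)).modify (xs.length + 1) f) = x :: (xs ++ f s :: suf)
    rw [List.modify_succ_cons, ih]

theorem inner_eq (c : List (List Int)) : ∀ (pre suf : List (List Int)),
    (PySem.List.enumerate c (pre.length : Int)).foldl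
      (fun possible_keys pk =>
        let possible_keys :=
          if pk.1 ≥ (possible_keys.length : Int) then possible_keys ++ [([] : List Int)]
          else possible_keys
        possible_keys.modify pk.1.toNat (fun s => PySem.Set.update s pk.2))
      (pre ++ suf) = pre ++ mergeZip suf c := by
  induction c with
  | nil => intro pre suf; simp [mergeZip]
  | cons k ks ih =>
    intro pre suf
    rw [PySem.List.enumerate_cons]
    cases suf with
    | nil =>
      have h1 : ((pre.length : Int) ≥ ((pre ++ ([] : List (List Int))).length : Int)) = True := by
        simp
      simp only [List.foldl_cons]
      have step : (let possible_keys :=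
            if (pre.length : Int) ≥ (((pre ++ ([] : List (List Int))).length : Int)) then
              (pre ++ ([] : List (List Int))) ++ [([] : List Int)]
            else pre ++ ([] : List (List Int))
          possible_keys.modify (pre.length : Int).toNat (fun s => PySem.Set.update s k))
          = (pre ++ [PySem.Set.update PySem.Set.empty k]) ++ ([] : List (List Int)) := by
        simp only [List.append_nil, ge_iff_le, le_refl, if_pos, Int.toNat_natCast]
        have : pre ++ [([] : List Int)] = pre ++ ([] : List Int) :: [] := rfl
        rw [this, modify_append_cons]
        simp [PySem.Set.empty]
      rw [step]
      have hlen : ((pre.length : Int) + 1) = (((pre ++ [PySem.Set.update PySem.Set.empty k]).length : Nat) : Int) := by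
        simp
      rw [hlen, ih]
      simp [mergeZip]
    | cons s suf' =>
      simp only [List.foldl_cons]
      have step : (let possible_keys :=
            if (pre.length : Int) ≥ (((pre ++ s :: suf').length : Int)) then
              (pre ++ s :: suf') ++ [([] : List Int)]
            else pre ++ s :: suf'
          possible_keys.modify (pre.length : Int).toNat (fun t => PySem.Set.update t k))
          = (pre ++ [PySem.Set.update s k]) ++ suf' := by
        have hc : ¬ ((pre.length : Int) ≥ (((pre ++ s :: suf').length : Int))) := by
          simp only [List.length_append, List.length_cons]
          omega
        simp only [hc, if_neg, Int.toNat_natCast, not_false_iff]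
        rw [modify_append_cons]
        simp
      rw [step]
      have hlen : ((pre.length : Int) + 1) = (((pre ++ [PySem.Set.update s k]).length : Nat) : Int) := by
        simp
      rw [hlen, ih]
      simp [mergeZip]

theorem portA_eq_foldl_mergeZip (kc : List (List (List Int))) :
    merge_key_bytes_per_pos_py kc = kc.foldl mergeZip [] := by
  unfold merge_key_bytes_per_pos_py
  congr 1
  funext acc comb
  have h := inner_eq comb [] acc
  simp only [List.nil_append, List.length_nil, Nat.cast_zero] at h
  exact h

theorem length_mergeZip : ∀ (a c : List (List Int)), (mergeZip a c).length = max a.length c.length := by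
  intro a c
  induction c generalizing a with
  | nil => cases a <;> simp [mergeZip]
  | cons k ks ih =>
    cases a with
    | nil => simp [mergeZip, ih]
    | cons s a' => simp [mergeZip, ih]

theorem getD_mergeZip : ∀ (a c : List (List Int)) (i : Nat),
    (mergeZip a c).getD i [] = PySem.Set.update (a.getD i []) (c.getD i []) := by
  intro a c
  induction c generalizing a with
  | nil =>
    intro i
    cases a with
    | nil => simp [mergeZip, PySem.Set.update]
    | cons s a' => simp [mergeZip, PySem.Set.update]
  | cons k ks ih =>
    intro i
    cases a with
    | nil =>
      cases i with
      | zero => simp [mergeZip, PySem.Set.empty]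
      | succ j => simpa [mergeZip] using ih [] j
    | cons s a' =>
      cases i with
      | zero => simp [mergeZip]
      | succ j => simpa [mergeZip] using ih a' j

theorem foldl_length (kc : List (List (List Int))) : ∀ (a : List (List Int)),
    (kc.foldl mergeZip a).length = kc.foldl (fun m comb => max m comb.length) a.length := by
  induction kc with
  | nil => intro a; simp
  | cons c cs ih =>
    intro a
    simp only [List.foldl_cons]
    rw [ih, length_mergeZip]

theorem foldl_getD (kc : List (List (List Int))) : ∀ (a : List (List Int)) (i : Nat),
    (kc.foldl mergeZip a).getD i [] =
      kc.foldl (fun s comb => PySem.Set.update s (comb.getD i [])) (a.getD i []) := by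
  induction kc with
  | nil => intro a i; simp
  | cons c cs ih =>
    intro a i
    simp only [List.foldl_cons]
    rw [ih, getD_mergeZip]

theorem guard_getD (pos : Nat) (comb : List (List Int)) :
    (if pos < comb.length then comb.getD pos [] else []) = comb.getD pos [] := by
  split_ifs with h
  · rfl
  · rw [List.getD_eq_default]
    omega

-- ===== VERDICT (by name: the statement is the Claim_ definition above) =====
theorem merge_key_bytes_per_pos_py_spec : Claim_equal_merge_key_bytes_per_pos_py := by
  intro kc _
  unfold Spec_merge_key_bytes_per_pos_py merge_key_bytes_per_pos_py_alt
  rw [portA_eq_foldl_mergeZip]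
  have hlen : (kc.foldl mergeZip []).length = kc.foldl (fun m comb => max m comb.length) 0 := by
    simpa using foldl_length kc []
  apply List.ext_getElem
  · simp [hlen]
  · intro i h1 h2
    have hi : i < kc.foldl (fun m comb => max m comb.length) 0 := by
      rw [← hlen]; exact h1
    have := foldl_getD kc [] i
    simp only [List.getD_nil] at this
    rw [← List.getD_eq_getElem (d := ([] : List Int)) _ h1, this]
    simp only [List.getElem_map, List.getElem_range]
    simp only [guard_getD, PySem.Set.empty]
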